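-- pv_equiv track=rewrite | github.com/vd141/PY110 | Exercises/Easy5/First_Pass/staggered_case_p2.py | staggered_case
-- ===== SOURCE A (Python) =====
-- def staggered_case(string):
--     '''
--     modify functino from p1 so it ignores non-alphabetic characters
--     when determining whether it should uppercase or lowercase each letter
--     '''
--
--     capitalize = True
--     new_str = ''
--
--     for char in string:
--         if char.isalpha():
--             if capitalize:
--                 new_str += char.upper()
--                 capitalize = False
--             else:
--                 new_str += char.lower()
--                 capitalize = True
--         else:
--             new_str += char
--
--     return new_str
-- ===== SOURCE B (Python) =====
-- def staggered_case(string):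
--     letters = [c for c in string if c.isalpha()]
--     cased = [l.upper() if i % 2 == 0 else l.lower() for i, l in enumerate(letters)]
--     it = iter(cased)
--     return ''.join(next(it) if c.isalpha() else c for c in string)
-- ===== Notes on version B (the rewrite author's own statement) =====
-- stated objective: alternative
-- what changed: Replaces the single stateful toggle loop with two index-free passes: filter out the letters, case them by index parity, then weave them back into the original string.
import Mathlib
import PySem

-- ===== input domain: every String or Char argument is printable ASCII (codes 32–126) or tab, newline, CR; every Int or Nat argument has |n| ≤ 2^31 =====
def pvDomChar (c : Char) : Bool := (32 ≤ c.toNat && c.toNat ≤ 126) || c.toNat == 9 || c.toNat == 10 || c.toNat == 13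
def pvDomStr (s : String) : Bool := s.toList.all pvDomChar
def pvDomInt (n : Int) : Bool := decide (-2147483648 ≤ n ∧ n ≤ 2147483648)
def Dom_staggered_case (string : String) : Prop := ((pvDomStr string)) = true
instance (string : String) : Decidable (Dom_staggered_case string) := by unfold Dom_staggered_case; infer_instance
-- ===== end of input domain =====

-- B replaces A's single stateful toggle loop by two passes: filter the letters, case them
-- by index parity, then weave them back into the original string (objective: alternative).

-- ===== PORT A =====
-- one stateful pass: (capitalize flag, accumulated characters)
def staggered_case (string : String) : String :=
  let r := string.toList.foldl
    (fun (st : Bool × List Char) c =>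
      if PySem.Chars.isalpha c then
        if st.1 then (false, st.2 ++ [PySem.Chars.upperChar c])
        else (true, st.2 ++ [PySem.Chars.lowerChar c])
      else (st.1, st.2 ++ [c]))
    (true, [])
  String.mk r.2

-- ===== PORT B =====
-- cased = [l.upper() if i % 2 == 0 else l.lower() for i, l in enumerate(letters)]
def pvCased (letters : List Char) : List Char :=
  (PySem.List.enumerate letters 0).map
    (fun p => if PySem.Int.mod p.1 2 = 0 then PySem.Chars.upperChar p.2 else PySem.Chars.lowerChar p.2)

-- ''.join(next(it) if c.isalpha() else c for c in string); the iterator never exhausts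
-- early (cased has one entry per alphabetic char), so the [] fallback is unreachable
def pvWeave : List Char → List Char → List Char
  | [], _ => []
  | c :: cs, its =>
      if PySem.Chars.isalpha c then
        match its with
        | l :: ls => l :: pvWeave cs ls
        | [] => []
      else c :: pvWeave cs its

def staggered_case_alt (string : String) : String :=
  let letters := string.toList.filter PySem.Chars.isalpha
  String.mk (pvWeave string.toList (pvCased letters))

-- ===== PRECONDITION & SPEC =====
def Spec_staggered_case (string : String) (out : String) : Prop := out = staggered_case_alt string
instance (string : String) (out : String) : Decidable (Spec_staggered_case string out) := by unfold Spec_staggered_case; infer_instance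

-- ===== CLAIM (what is proved, stated in full; the proofs are below) =====
def Claim_equal_staggered_case : Prop := ∀ (string : String), Dom_staggered_case string → Spec_staggered_case string (staggered_case string)

-- ===== LEMMAS AND PROOFS =====

-- parity-flag characterization of the cased letters
def pvCasedFrom : Bool → List Char → List Char
  | _, [] => []
  | b, l :: ls =>
      (if b then PySem.Chars.upperChar l else PySem.Chars.lowerChar l) :: pvCasedFrom (!b) ls

theorem pvCased_from (ls : List Char) : ∀ (s : Nat),
    (PySem.List.enumerate ls (s : Int)).map
      (fun p => if PySem.Int.mod p.1 2 = 0 then PySem.Chars.upperChar p.2 else PySem.Chars.lowerChar p.2)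
      = pvCasedFrom (s % 2 == 0) ls := by
  induction ls with
  | nil => intro s; simp [PySem.List.enumerate_nil, pvCasedFrom]
  | cons l ls ih =>
      intro s
      have h2 : PySem.Int.mod (s : Int) 2 = ((s % 2 : Nat) : Int) := PySem.Int.mod_natCast s 2
      have h1 : ((s : Int) + 1) = ((s + 1 : Nat) : Int) := by push_cast; ring
      simp only [PySem.List.enumerate_cons, List.map_cons, pvCasedFrom, h2, h1, ih (s + 1)]
      congr 1
      · rcases Nat.even_or_odd s with h | h
        · have : s % 2 = 0 := Nat.even_iff.mp h
          simp [this]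
        · have : s % 2 = 1 := Nat.odd_iff.mp h
          simp [this]
      · congr 1
        rcases Nat.even_or_odd s with h | h
        · have h0 : s % 2 = 0 := Nat.even_iff.mp h
          have h1' : (s + 1) % 2 = 1 := by omega
          simp [h0, h1']
        · have h0 : s % 2 = 1 := Nat.odd_iff.mp h
          have h1' : (s + 1) % 2 = 0 := by omega
          simp [h0, h1']

theorem pvCased_eq (ls : List Char) : pvCased ls = pvCasedFrom true ls := by
  have := pvCased_from ls 0
  simpa [pvCased] using this

-- loop invariant: A's fold from flag b equals acc ++ weave with letters cased from parity b
theorem pvFold_eq (cs : List Char) : ∀ (b : Bool) (acc : List Char),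
    (cs.foldl
      (fun (st : Bool × List Char) c =>
        if PySem.Chars.isalpha c then
          if st.1 then (false, st.2 ++ [PySem.Chars.upperChar c])
          else (true, st.2 ++ [PySem.Chars.lowerChar c])
        else (st.1, st.2 ++ [c]))
      (b, acc)).2
    = acc ++ pvWeave cs (pvCasedFrom b (cs.filter PySem.Chars.isalpha)) := by
  induction cs with
  | nil => intro b acc; simp [pvWeave]
  | cons c cs ih =>
      intro b acc
      by_cases hα : PySem.Chars.isalpha c
      · cases b with
        | true => simp [hα, pvWeave, pvCasedFrom, ih, List.foldl_cons]
        | false => simp [hα, pvWeave, pvCasedFrom, ih, List.foldl_cons]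
      · simp [hα, pvWeave, ih, List.foldl_cons]

-- ===== VERDICT (by name: the statement is the Claim_ definition above) =====
theorem staggered_case_spec : Claim_equal_staggered_case := by
  intro s _
  unfold Spec_staggered_case staggered_case staggered_case_alt
  simp only []
  rw [pvCased_eq]
  rw [pvFold_eq s.toList true []]
  simp
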